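-- pv_equiv track=rewrite | github.com/Ivancirijillo/app | app.py | encontrar_municipio
-- ===== SOURCE A (Python) =====
-- def encontrar_municipio(respuesta):
--     #Nos posicionamos en la posicion de la respuesta que tiene el primer municipio
--     municipio_actual = respuesta[0][0]
--     #variable que guarda los municipios encontrados
--     municipios = []
--     #Guarda las secciones del municipio
--     secciones = []
--     #Variable que cuenta las secciones del municipio
--     contador = 0
--     #Agrega el municipio actual al arreglo municipios
--     municipios.append(municipio_actual)
--     for i in range(len(respuesta)):
--         #Si el municipio actual aparece en la siguiente fila, es una nueva seccion del mismo municipio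
--         if(municipio_actual == respuesta[i][0]):
--             contador += 1
--         else:
--             #Agrega el numero de secciones encontradas al arreglo de secciones
--             secciones.append(contador)
--             #Actualizamos el municipio actual al nuevo encontrado
--             municipio_actual = respuesta[i][0]
--             #Agrega el nuevo municipio al arreglo de municipios
--             municipios.append(municipio_actual)
--             #Inicializamos el contadoe en 1
--             contador = 1
--     secciones.append(contador) # Agregar la última sección
--     return municipios, secciones #Regresa los municipios encontrados ademas de sus secciones
-- ===== SOURCE B (Python) =====
-- def encontrar_municipio(respuesta):
--     municipios = []
--     secciones = []
--     i = 0
--     n = len(respuesta)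
--     while i < n:
--         clave = respuesta[i][0]
--         j = i
--         while j < n and respuesta[j][0] == clave:
--             j += 1
--         municipios.append(clave)
--         secciones.append(j - i)
--         i = j
--     return municipios, secciones
-- ===== Notes on version B (the rewrite author's own statement) =====
-- stated objective: alternative
-- what changed: Replaces A's stateful single pass (current-municipio variable plus running counter updated row by row) with a two-index run-length scan that consumes each maximal run of equal first elements at once and appends its key and length.
import Mathlib
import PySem

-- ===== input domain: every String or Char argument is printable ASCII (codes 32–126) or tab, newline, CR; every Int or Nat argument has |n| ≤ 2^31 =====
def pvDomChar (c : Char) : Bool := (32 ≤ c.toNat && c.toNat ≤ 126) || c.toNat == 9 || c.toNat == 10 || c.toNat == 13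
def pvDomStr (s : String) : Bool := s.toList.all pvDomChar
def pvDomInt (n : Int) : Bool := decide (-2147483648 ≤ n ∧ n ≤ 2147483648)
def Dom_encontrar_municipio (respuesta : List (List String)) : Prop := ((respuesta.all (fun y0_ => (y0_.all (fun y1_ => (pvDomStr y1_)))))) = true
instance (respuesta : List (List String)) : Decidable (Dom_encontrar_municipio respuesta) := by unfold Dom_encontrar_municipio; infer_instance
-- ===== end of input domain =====

-- B replaces A's stateful single pass (current key + running counter) with a
-- two-index run-length scan consuming each maximal run at once (alternative, same cost).


-- ===== PORT A =====
-- A's loop body (kept as a named helper so the lemmas can speak about it)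
def pvStepA (st : List String × List Int × Int × String) (row : List String) :
    List String × List Int × Int × String :=
  let (municipios, secciones, contador, actual) := st
  if actual == row.headD "" then
    (municipios, secciones, contador + 1, actual)
  else
    (municipios ++ [row.headD ""], secciones ++ [contador], 1, row.headD "")

-- row[0] is ported as row.headD ""; Pre_ guarantees every row is nonempty, where this is exact.
def encontrar_municipio (respuesta : List (List String)) : List String × List Int :=
  let municipio_actual := (respuesta.headD []).headD ""
  let st := respuesta.foldl pvStepA ([municipio_actual], ([] : List Int), (0 : Int), municipio_actual)
  (st.1, st.2.1 ++ [st.2.2.1])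

-- ===== PORT B =====
-- inner while loop of B: length of the leading run whose first element is clave, plus the rest
def pvRun (clave : String) : List (List String) → Int × List (List String)
  | [] => (0, [])
  | r :: rest =>
    if r.headD "" == clave then
      let p := pvRun clave rest
      (p.1 + 1, p.2)
    else (0, r :: rest)

theorem pvRun_length_le (clave : String) (xs : List (List String)) :
    (pvRun clave xs).2.length ≤ xs.length := by
  induction xs with
  | nil => simp [pvRun]
  | cons r rest ih =>
    simp only [pvRun]
    split
    · exact Nat.le_trans ih (Nat.le_succ _)
    · exact Nat.le_refl _

def encontrar_municipio_alt : List (List String) → List String × List Int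
  | [] => ([], [])
  | r :: rest =>
    let clave := r.headD ""
    let p := pvRun clave rest
    let q := encontrar_municipio_alt p.2
    (clave :: q.1, (p.1 + 1) :: q.2)
termination_by xs => xs.length
decreasing_by
  exact Nat.lt_succ_of_le (pvRun_length_le _ _)

-- ===== PRECONDITION & SPEC =====
-- Pre_ excludes exactly the inputs where Python A raises IndexError:
-- the empty list (respuesta[0][0]) and lists containing an empty row (respuesta[i][0]).
def Pre_encontrar_municipio (respuesta : List (List String)) : Prop :=
  respuesta ≠ [] ∧ ∀ r ∈ respuesta, r ≠ []
instance (respuesta : List (List String)) : Decidable (Pre_encontrar_municipio respuesta) := by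
  unfold Pre_encontrar_municipio; infer_instance

def pvWitness_encontrar_municipio : List (List String) :=
  [["a", "1"], ["a", "2"], ["b", "3"]]

def Spec_encontrar_municipio (respuesta : List (List String)) (out : List String × List Int) : Prop := out = encontrar_municipio_alt respuesta
instance (respuesta : List (List String)) (out : List String × List Int) : Decidable (Spec_encontrar_municipio respuesta out) := by unfold Spec_encontrar_municipio; infer_instance

-- ===== CLAIM (what is proved, stated in full; the proofs are below) =====
def Claim_equal_encontrar_municipio : Prop := ∀ (respuesta : List (List String)), Dom_encontrar_municipio respuesta → Pre_encontrar_municipio respuesta → Spec_encontrar_municipio respuesta (encontrar_municipio respuesta)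

-- ===== LEMMAS AND PROOFS =====

theorem foldA_eq_alt (xs : List (List String)) :
    ∀ (ms : List String) (ss : List Int) (c : Int) (a : String),
      (let st := xs.foldl pvStepA (ms, ss, c, a)
       (st.1, st.2.1 ++ [st.2.2.1])) =
      (let p := pvRun a xs
       let q := encontrar_municipio_alt p.2
       (ms ++ q.1, ss ++ [c + p.1] ++ q.2)) := by
  induction xs with
  | nil =>
    intro ms ss c a
    simp [pvRun, encontrar_municipio_alt]
  | cons r rest ih =>
    intro ms ss c a
    simp only [List.foldl_cons, pvStepA, pvRun]
    by_cases he : r.headD "" = a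
    · rw [he, if_pos (by simp), if_pos (by simp)]
      have := ih ms ss (c + 1) a
      simp only at this
      rw [this]
      have harith : c + 1 + (pvRun a rest).1 = c + ((pvRun a rest).1 + 1) := by ring
      simp [harith]
    · have hne1 : ¬ (a == r.headD "") = true := fun hb => he (beq_iff_eq.mp hb).symm
      have hne2 : ¬ (r.headD "" == a) = true := fun hb => he (beq_iff_eq.mp hb)
      rw [if_neg hne1, if_neg hne2]
      have := ih (ms ++ [r.headD ""]) (ss ++ [c]) 1 (r.headD "")
      simp only at this
      rw [this]
      conv_rhs => rw [encontrar_municipio_alt]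
      simp [Int.add_comm]

-- ===== VERDICT (by name: the statement is the Claim_ definition above) =====
theorem encontrar_municipio_spec : Claim_equal_encontrar_municipio := by
  intro respuesta _ hpre
  unfold Spec_encontrar_municipio
  obtain ⟨hne, _⟩ := hpre
  match respuesta, hne with
  | r :: rest, _ =>
    unfold encontrar_municipio
    simp only [List.headD_cons, List.foldl_cons, pvStepA, beq_self_eq_true, if_pos, zero_add]
    have := foldA_eq_alt rest [r.headD ""] [] 1 (r.headD "")
    simp only at this
    rw [this]
    conv_rhs => rw [encontrar_municipio_alt]
    simp [Int.add_comm]
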